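-- pv_equiv track=rewrite | github.com/Aidix21/Shaykhutdinov_YNBO_07_24_Practic2 | pr2.py | clean_dependency
-- ===== SOURCE A (Python) =====
-- def clean_dependency(dep):
--     """Очистка зависимости от условий версий и системных вызовов"""
--     if not dep:
--         return None
--
--     for char in ['~', '<', '>', '=', '!']:
--         if char in dep:
--             dep = dep.split(char)[0]
--
--     if dep.startswith(('so:', '/', 'scanelf', 'lddtree', 'cmd:')):
--         return None
--
--     return dep.strip() if dep else None
-- ===== SOURCE B (Python) =====
-- def clean_dependency(dep):
--     """Single left-to-right scan: take the prefix before the first version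
--     operator, then reject system-call prefixes, else strip."""
--     if not dep:
--         return None
--     head = []
--     for ch in dep:
--         if ch in '~<>=!':
--             break
--         head.append(ch)
--     head = ''.join(head)
--     for prefix in ('so:', '/', 'scanelf', 'lddtree', 'cmd:'):
--         if head.startswith(prefix):
--             return None
--     return head.strip() if head else None
-- ===== Notes on version B (the rewrite author's own statement) =====
-- stated objective: simpler
-- what changed: B replaces A's five sequential split-and-truncate passes (one per version-operator character) by a single left-to-right scan that takes the prefix before the first version-operator character, then the same system-prefix rejection and strip.
import Mathlib
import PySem

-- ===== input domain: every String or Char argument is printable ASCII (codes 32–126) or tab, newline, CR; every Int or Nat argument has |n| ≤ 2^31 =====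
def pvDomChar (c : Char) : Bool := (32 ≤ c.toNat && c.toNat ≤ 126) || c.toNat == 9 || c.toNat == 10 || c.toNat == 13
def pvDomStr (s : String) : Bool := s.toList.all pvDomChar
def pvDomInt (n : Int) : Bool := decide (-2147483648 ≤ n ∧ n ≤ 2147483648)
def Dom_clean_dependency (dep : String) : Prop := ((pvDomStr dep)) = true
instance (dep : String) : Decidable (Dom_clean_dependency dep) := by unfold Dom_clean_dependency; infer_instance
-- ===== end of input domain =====

-- B replaces A's five sequential split-and-truncate passes by one left-to-right scan
-- (takeWhile up to the first version-operator character); objective: simpler.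

-- ===== PORT A =====
-- the five version-operator characters A iterates over, in A's order
def pvOpsA : List Char := ['~', '<', '>', '=', '!']
-- the system-call prefixes of the startswith tuple
def pvPrefixes : List (List Char) := ["so:".toList, "/".toList, "scanelf".toList, "lddtree".toList, "cmd:".toList]

def clean_dependency (dep : String) : Option String :=
  if dep.toList = [] then none
  else
    -- for char in [...]: if char in dep: dep = dep.split(char)[0]
    -- ([0] written as headD []: str.split never returns an empty list, so no IndexError)
    let d := pvOpsA.foldl
      (fun d c => if PySem.Chars.isIn [c] d then (PySem.Chars.splitOn d [c]).headD [] else d)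
      dep.toList
    if pvPrefixes.any (fun p => PySem.Chars.startswith d p) then none
    else if d = [] then none else some (String.ofList (PySem.Chars.strip d))

-- ===== PORT B =====
-- the loop 'for ch in dep: if ch in '~<>=!': break; head.append(ch)' is a takeWhile
def clean_dependency_alt (dep : String) : Option String :=
  if dep.toList = [] then none
  else
    let head := dep.toList.takeWhile (fun ch => !("~<>=!".toList.contains ch))
    if pvPrefixes.any (fun p => PySem.Chars.startswith head p) then none
    else if head = [] then none else some (String.ofList (PySem.Chars.strip head))

-- ===== PRECONDITION & SPEC =====
def Spec_clean_dependency (dep : String) (out : Option String) : Prop := out = clean_dependency_alt dep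
instance (dep : String) (out : Option String) : Decidable (Spec_clean_dependency dep out) := by unfold Spec_clean_dependency; infer_instance

-- ===== CLAIM (what is proved, stated in full; the proofs are below) =====
def Claim_equal_clean_dependency : Prop := ∀ (dep : String), Dom_clean_dependency dep → Spec_clean_dependency dep (clean_dependency dep)

-- ===== LEMMAS AND PROOFS =====

-- pointwise-equal predicates give the same takeWhile
theorem takeWhile_pred_congr {α : Type} {p q : α → Bool} (h : ∀ x, p x = q x)
    (l : List α) : l.takeWhile p = l.takeWhile q := by
  have : p = q := funext h
  rw [this]

-- the first piece of a single-character split is the prefix before the first occurrence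
theorem splitOn_go_single_head (c : Char) :
    ∀ (fuel : Nat) (l cur : List Char) (acc : List (List Char)), l.length ≤ fuel →
      ∃ t, PySem.Chars.splitOn.go [c] fuel l cur acc
        = acc.reverse ++ (cur.reverse ++ l.takeWhile (fun x => !(x == c))) :: t := by
  intro fuel
  induction fuel with
  | zero =>
    intro l cur acc h
    have hl : l = [] := List.eq_nil_of_length_eq_zero (Nat.le_zero.mp h)
    subst hl
    exact ⟨[], by simp [PySem.Chars.splitOn.go]⟩
  | succ f ih =>
    intro l cur acc h
    cases l with
    | nil => exact ⟨[], by simp [PySem.Chars.splitOn.go]⟩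
    | cons ch rest =>
      have hlen : rest.length ≤ f := by simpa using Nat.lt_succ_iff.mp (by simpa using h)
      by_cases hc : ch = c
      · subst hc
        have hpre : [ch].isPrefixOf (ch :: rest) = true := by simp [List.isPrefixOf]
        obtain ⟨t, ht⟩ := ih rest [] (cur.reverse :: acc) hlen
        refine ⟨rest.takeWhile (fun x => !(x == ch)) :: t, ?_⟩
        rw [PySem.Chars.splitOn.go.eq_def]
        simp [hpre, ht, List.takeWhile]
      · have hcc : (c == ch) = false := by simp; exact fun hh => hc hh.symm
        have hpre : [c].isPrefixOf (ch :: rest) = false := by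
          simp [List.isPrefixOf, hcc]
        obtain ⟨t, ht⟩ := ih rest (ch :: cur) acc hlen
        refine ⟨t, ?_⟩
        rw [PySem.Chars.splitOn.go.eq_def]
        have hcc' : (ch == c) = false := by simp [hc]
        simp [hpre, ht, List.takeWhile, hcc']

theorem splitOn_single_head (c : Char) (d : List Char) :
    (PySem.Chars.splitOn d [c]).headD [] = d.takeWhile (fun x => !(x == c)) := by
  obtain ⟨t, ht⟩ := splitOn_go_single_head c (d.length + 1) d [] [] (Nat.le_succ _)
  simp [PySem.Chars.splitOn, ht]

-- one guarded split-truncate step of A equals an unconditional takeWhile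
theorem step_eq_takeWhile (c : Char) (d : List Char) :
    (if PySem.Chars.isIn [c] d then (PySem.Chars.splitOn d [c]).headD [] else d)
      = d.takeWhile (fun x => !(x == c)) := by
  by_cases h : PySem.Chars.isIn [c] d = true
  · rw [if_pos h]
    exact splitOn_single_head c d
  · have hni : ¬ [c] <:+: d := (PySem.Chars.isIn_eq_false_iff _ _).mp (by simpa using h)
    have hmem : c ∉ d := by
      intro hm
      obtain ⟨s, t, rfl⟩ := List.append_of_mem hm
      exact hni ⟨s, t, by simp⟩
    rw [if_neg h]
    exact (List.takeWhile_eq_self_iff.mpr (by intro x hx; simp; rintro rfl; exact hmem hx)).symm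

-- folding the takeWhile steps over a char list = one takeWhile with the combined predicate
theorem foldl_takeWhile (cs : List Char) : ∀ (d : List Char),
    cs.foldl (fun d c => d.takeWhile (fun x => !(x == c))) d
      = d.takeWhile (fun x => !(cs.contains x)) := by
  induction cs with
  | nil =>
    intro d
    simp only [List.foldl_nil]
    exact (List.takeWhile_eq_self_iff.mpr (by simp)).symm
  | cons c cs ih =>
    intro d
    simp only [List.foldl_cons, ih]
    rw [List.takeWhile_takeWhile]
    apply takeWhile_pred_congr
    intro x
    simp [Bool.and_comm]

-- ===== VERDICT (by name: the statement is the Claim_ definition above) =====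
theorem clean_dependency_spec : Claim_equal_clean_dependency := by
  intro dep _
  unfold Spec_clean_dependency clean_dependency clean_dependency_alt
  have hstep : (fun (d : List Char) (c : Char) =>
      if PySem.Chars.isIn [c] d then (PySem.Chars.splitOn d [c]).headD [] else d)
      = (fun (d : List Char) (c : Char) => d.takeWhile (fun x => !(x == c))) := by
    funext d c
    exact step_eq_takeWhile c d
  have hfold : pvOpsA.foldl
      (fun d c => if PySem.Chars.isIn [c] d then (PySem.Chars.splitOn d [c]).headD [] else d)
      dep.toList
      = dep.toList.takeWhile (fun ch => !("~<>=!".toList.contains ch)) := by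
    rw [hstep, foldl_takeWhile]
    apply takeWhile_pred_congr
    intro x
    have hs : "~<>=!".toList = ['~', '<', '>', '=', '!'] := rfl
    simp [pvOpsA, hs]
  simp only [hfold]
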